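-- pv_equiv track=rewrite | github.com/xiuixb/M2U_Transpiler | src/core_symbol/muti_flows/mcl_preprocess.py | collect_raw_commands
-- ===== SOURCE A (Python) =====
-- from typing import List, Dict, Tuple
--
-- def collect_raw_commands(input_lines: List[str]) -> List[Tuple[int, str]]:
--     """
--     返回：[(orig_lineno, merged_command)]
--     """
--     buffer = ""
--     start_lineno = 0
--     collected = []
--
--     for i, raw in enumerate(input_lines, start=1):
--         if not raw.strip():
--             continue
--         if raw.strip().startswith(("!", "C ", "Z ")):  # 注释行
--             continue
--
--         line = raw.upper()
--         stripped = line.split("!")[0].strip()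
--         if not stripped:
--             continue
--
--         if buffer == "":  # start new command
--             buffer = stripped
--             start_lineno = i
--         else:
--             buffer += "  " + stripped
--
--         if ";" in stripped:  # command ends
--             collected.append((start_lineno, buffer.strip()))
--             buffer = ""
--             start_lineno = 0
--
--     return collected
-- ===== SOURCE B (Python) =====
-- from typing import List, Tuple, Optional
--
--
-- def _clean(i: int, raw: str) -> Optional[Tuple[int, str]]:
--     s = raw.strip()
--     if not s or s.startswith(("!", "C ", "Z ")):
--         return None
--     text = raw.upper().split("!")[0].strip()
--     return (i, text) if text else None
--
--
-- def collect_raw_commands(input_lines: List[str]) -> List[Tuple[int, str]]: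
--     # pass 1: normalize and filter; pass 2: group pieces into ';'-terminated commands
--     cleaned = []
--     for i, raw in enumerate(input_lines, 1):
--         item = _clean(i, raw)
--         if item is not None:
--             cleaned.append(item)
--
--     collected = []
--     group: List[str] = []
--     start = 0
--     for i, text in cleaned:
--         if not group:
--             start = i
--         group.append(text)
--         if ";" in text:
--             collected.append((start, "  ".join(group)))
--             group = []
--     return collected
-- ===== Notes on version B (the rewrite author's own statement) =====
-- stated objective: simpler
-- what changed: B splits A's single stateful pass into a normalization/filter pass producing (lineno, text) items and a separate grouping pass that keeps a list of pieces and joins them only at emission, instead of A's incremental string buffer with strip-on-emit.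
import Mathlib
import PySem

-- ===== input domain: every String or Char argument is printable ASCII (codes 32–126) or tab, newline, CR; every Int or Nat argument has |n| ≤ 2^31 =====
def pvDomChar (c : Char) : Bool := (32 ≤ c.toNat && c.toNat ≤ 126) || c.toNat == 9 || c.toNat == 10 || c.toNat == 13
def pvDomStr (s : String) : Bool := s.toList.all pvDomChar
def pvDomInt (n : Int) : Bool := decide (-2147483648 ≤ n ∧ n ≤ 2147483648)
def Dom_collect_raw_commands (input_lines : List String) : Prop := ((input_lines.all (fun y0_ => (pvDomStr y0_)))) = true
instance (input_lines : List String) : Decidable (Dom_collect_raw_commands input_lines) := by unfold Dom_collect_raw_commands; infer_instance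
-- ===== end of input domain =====

-- B separates normalization/filtering (first pass) from the ';'-terminated grouping state machine
-- (second pass over the cleaned list, keeping a list of pieces joined at emission) — objective: simpler decomposition, same cost.

-- ===== PORT A =====
-- loop body of A's single pass (state = (buffer, start_lineno, collected))
def collect_raw_commands_step (st : String × Int × List (Int × String)) (p : Int × String) :
    String × Int × List (Int × String) :=
  let buffer := st.1
  let start_lineno := st.2.1
  let collected := st.2.2
  let i := p.1
  let raw := p.2
  if PySem.Str.strip raw = "" then st
  else if PySem.Str.startswith (PySem.Str.strip raw) "!" ||
          PySem.Str.startswith (PySem.Str.strip raw) "C " ||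
          PySem.Str.startswith (PySem.Str.strip raw) "Z " then st
  else
    let line := PySem.Str.upper raw
    -- line.split("!")[0]: split with a nonempty separator always returns a nonempty list, so [0] never raises
    let stripped := PySem.Str.strip (((PySem.Str.split? line "!").getD []).headD "")
    if stripped = "" then st
    else
      let bs : String × Int :=
        if buffer = "" then (stripped, i) else (buffer ++ "  " ++ stripped, start_lineno)
      if PySem.Str.isIn ";" stripped then
        ("", 0, collected ++ [(bs.2, PySem.Str.strip bs.1)])
      else (bs.1, bs.2, collected)

def collect_raw_commands (input_lines : List String) : List (Int × String) :=
  ((PySem.List.enumerate input_lines 1).foldl collect_raw_commands_step ("", 0, [])).2.2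

-- ===== PORT B =====
-- Source B's _clean: None for blank/comment/empty-after-'!' lines, else (i, normalized text)
def crc_clean_line (i : Int) (raw : String) : Option (Int × String) :=
  let s := PySem.Str.strip raw
  if s = "" || PySem.Str.startswith s "!" || PySem.Str.startswith s "C " ||
     PySem.Str.startswith s "Z " then none
  else
    let text := PySem.Str.strip (((PySem.Str.split? (PySem.Str.upper raw) "!").getD []).headD "")
    if text = "" then none else some (i, text)

-- loop body of Source B's second pass (state = (group, start, collected))
def crc_merge_step (st : List String × Int × List (Int × String)) (p : Int × String) :
    List String × Int × List (Int × String) :=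
  let start := if st.1 = [] then p.1 else st.2.1
  let group := st.1 ++ [p.2]
  if PySem.Str.isIn ";" p.2 then ([], start, st.2.2 ++ [(start, PySem.Str.join "  " group)])
  else (group, start, st.2.2)

def collect_raw_commands_alt (input_lines : List String) : List (Int × String) :=
  let cleaned := (PySem.List.enumerate input_lines 1).foldl
    (fun acc p =>
      match crc_clean_line p.1 p.2 with
      | some item => acc ++ [item]
      | none => acc) []
  (cleaned.foldl crc_merge_step ([], 0, [])).2.2

-- ===== PRECONDITION & SPEC =====
def Spec_collect_raw_commands (input_lines : List String) (out : List (Int × String)) : Prop := out = collect_raw_commands_alt input_lines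
instance (input_lines : List String) (out : List (Int × String)) : Decidable (Spec_collect_raw_commands input_lines out) := by unfold Spec_collect_raw_commands; infer_instance

-- ===== CLAIM (what is proved, stated in full; the proofs are below) =====
def Claim_equal_collect_raw_commands : Prop := ∀ (input_lines : List String), Dom_collect_raw_commands input_lines → Spec_collect_raw_commands input_lines (collect_raw_commands input_lines)

-- ===== LEMMAS AND PROOFS =====

-- A's loop body, rephrased through the filter: skip, or act on the cleaned item
def crc_core (st : String × Int × List (Int × String)) (q : Int × String) :
    String × Int × List (Int × String) :=
  let bs : String × Int :=
    if st.1 = "" then (q.2, q.1) else (st.1 ++ "  " ++ q.2, st.2.1)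
  if PySem.Str.isIn ";" q.2 then ("", 0, st.2.2 ++ [(bs.2, PySem.Str.strip bs.1)])
  else (bs.1, bs.2, st.2.2)

theorem crc_stepA_eq (st : String × Int × List (Int × String)) (p : Int × String) :
    collect_raw_commands_step st p =
      match crc_clean_line p.1 p.2 with
      | some q => crc_core st q
      | none => st := by
  simp only [collect_raw_commands_step, crc_clean_line, crc_core]
  split_ifs <;> simp_all

-- non-space at head and tail, and nonempty: what `strip` guarantees of its nonempty results
def CrcStripped (cs : List Char) : Prop :=
  cs ≠ [] ∧ cs.dropWhile PySem.Chars.isspace = cs ∧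
    cs.reverse.dropWhile PySem.Chars.isspace = cs.reverse

theorem crc_dropWhile_idem {α : Type} (p : α → Bool) (l : List α) :
    (l.dropWhile p).dropWhile p = l.dropWhile p := by
  cases h : l.dropWhile p with
  | nil => simp
  | cons a t =>
    have ha : p a = false := by
      have := List.head_dropWhile_not p (l := l) (by simp [h])
      simpa [h] using this
    simp [ha]

theorem crc_head_false {α : Type} {p : α → Bool} {h : α} {t : List α}
    (hd : (h :: t).dropWhile p = h :: t) : p h = false := by
  by_contra hb
  have hp : p h = true := by simpa using hb
  have := List.length_dropWhile_le p t
  rw [List.dropWhile_cons, hp] at hd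
  simp at hd
  have := congrArg List.length hd
  simp at this
  omega

theorem crc_stripped_strip_eq {cs : List Char} (h : CrcStripped cs) :
    PySem.Chars.strip cs = cs := by
  obtain ⟨-, h1, h2⟩ := h
  simp [PySem.Chars.strip, PySem.Chars.lstrip, PySem.Chars.rstrip, h1, h2]

theorem crc_strip_stripped (s : List Char) (h : PySem.Chars.strip s ≠ []) :
    CrcStripped (PySem.Chars.strip s) := by
  refine ⟨h, ?_, ?_⟩
  · -- strip s is a prefix of lstrip s, whose head fails isspace
    set y := s.dropWhile PySem.Chars.isspace with hy
    have hstrip : PySem.Chars.strip s =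
        (y.reverse.dropWhile PySem.Chars.isspace).reverse := rfl
    have hysplit : y = (y.reverse.dropWhile PySem.Chars.isspace).reverse ++
        (y.reverse.takeWhile PySem.Chars.isspace).reverse := by
      rw [← List.reverse_append, List.takeWhile_append_dropWhile, List.reverse_reverse]
    cases hc : PySem.Chars.strip s with
    | nil => exact absurd hc h
    | cons a t =>
      have hya : y = a :: (t ++ (y.reverse.takeWhile PySem.Chars.isspace).reverse) := by
        conv_lhs => rw [hysplit]
        rw [← hstrip, hc]; simp
      have hyidem : y.dropWhile PySem.Chars.isspace = y := by
        rw [hy]; exact crc_dropWhile_idem _ _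
      have ha : PySem.Chars.isspace a = false := by
        apply crc_head_false (t := t ++ (y.reverse.takeWhile PySem.Chars.isspace).reverse)
        rw [← hya]; rw [hyidem, hya]
      simp [ha]
  · rw [show PySem.Chars.strip s =
        (((s.dropWhile PySem.Chars.isspace).reverse.dropWhile PySem.Chars.isspace)).reverse
      from rfl]
    simp [crc_dropWhile_idem]

theorem crc_append_stripped {a b : List Char} (m : List Char)
    (ha : CrcStripped a) (hb : CrcStripped b) : CrcStripped (a ++ m ++ b) := by
  obtain ⟨hane, ha1, ha2⟩ := ha
  obtain ⟨hbne, hb1, hb2⟩ := hb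
  refine ⟨by simp [hane], ?_, ?_⟩
  · cases a with
    | nil => exact absurd rfl hane
    | cons x xs =>
      have hx : PySem.Chars.isspace x = false := crc_head_false ha1
      simp [hx]
  · rcases hbr : b.reverse with _ | ⟨y, ys⟩
    · exact absurd (by simpa using hbr) hbne
    · have hy : PySem.Chars.isspace y = false := crc_head_false (hbr ▸ hb2)
      simp [hbr, hy]

theorem crc_join_stripped (sep : List Char) :
    ∀ (gs : List (List Char)), gs ≠ [] → (∀ g ∈ gs, CrcStripped g) →
      CrcStripped (PySem.Chars.join sep gs) := by
  intro gs
  induction gs with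
  | nil => intro h; exact absurd rfl h
  | cons g rest ih =>
    intro _ hall
    cases rest with
    | nil => simpa [PySem.Chars.join_singleton] using hall g (by simp)
    | cons g2 r2 =>
      rw [PySem.Chars.join_cons_cons]
      exact crc_append_stripped sep (hall g (by simp))
        (ih (by simp) (fun x hx => hall x (by simp [hx])))

theorem crc_join_append_singleton (sep : List Char) :
    ∀ (gs : List (List Char)) (g : List Char), gs ≠ [] →
      PySem.Chars.join sep (gs ++ [g]) = PySem.Chars.join sep gs ++ sep ++ g := by
  intro gs
  induction gs with
  | nil => intro g h; exact absurd rfl h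
  | cons a rest ih =>
    intro g _
    cases rest with
    | nil => simp [PySem.Chars.join_cons_cons, PySem.Chars.join_singleton]
    | cons b r =>
      have := ih g (by simp)
      simp only [List.cons_append, PySem.Chars.join_cons_cons] at this ⊢
      rw [this]; simp
 
theorem crc_join_ne_nil (sep : List Char) (gs : List (List Char)) (hne : gs ≠ [])
    (hall : ∀ g ∈ gs, g ≠ []) : PySem.Chars.join sep gs ≠ [] := by
  cases gs with
  | nil => exact absurd rfl hne
  | cons g rest =>
    cases rest with
    | nil => simpa [PySem.Chars.join_singleton] using hall g (by simp)
    | cons g2 r2 =>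
      rw [PySem.Chars.join_cons_cons]
      have := hall g (by simp)
      simp [this]

theorem crc_merge_eq :
    ∀ (l : List (Int × String)) (buf : String) (stA stB : Int)
      (grp : List String) (col : List (Int × String)),
      (∀ p ∈ l, ∃ s : String, p.2 = PySem.Str.strip s ∧ p.2 ≠ "") →
      buf.toList = PySem.Chars.join "  ".toList (grp.map String.toList) →
      (∀ g ∈ grp, CrcStripped g.toList) →
      (grp ≠ [] → stA = stB) →
      (l.foldl crc_core (buf, stA, col)).2.2 =
        (l.foldl crc_merge_step (grp, stB, col)).2.2 := by
  intro l
  induction l with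
  | nil => intros; rfl
  | cons p l ih =>
    intro buf stA stB grp col hmem hbuf hgrp hst
    obtain ⟨s, hps, hpne⟩ := hmem p (by simp)
    have hpl : p.2.toList ≠ [] := fun h => hpne (String.toList_inj.mp (by simpa using h))
    have hpstr : CrcStripped p.2.toList := by
      rw [hps, PySem.Str.toList_strip]
      exact crc_strip_stripped _ (by rw [← PySem.Str.toList_strip, ← hps]; exact hpl)
    have hmem' : ∀ q ∈ l, ∃ s : String, q.2 = PySem.Str.strip s ∧ q.2 ≠ "" :=
      fun q hq => hmem q (by simp [hq])
    simp only [List.foldl_cons]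
    cases hg : grp with
    | nil =>
      have hbe : buf = "" := by
        apply String.toList_inj.mp
        rw [hbuf, hg]; rfl
      subst hbe
      rw [crc_core, crc_merge_step]
      subst hg
      by_cases hsemi : PySem.Str.isIn ";" p.2 = true
      · simp only [hsemi, if_true]
        have hj : PySem.Str.join "  " [p.2] = p.2 := by
          apply String.toList_inj.mp
          rw [PySem.Str.toList_join]
          simp [PySem.Chars.join_singleton]
        have hstr : PySem.Str.strip p.2 = p.2 := by
          apply String.toList_inj.mp
          rw [PySem.Str.toList_strip, crc_stripped_strip_eq hpstr]
        simp only [List.nil_append] at hj ⊢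
        simp only [hj, hstr]
        exact ih "" 0 p.1 [] (col ++ [(p.1, p.2)]) hmem' (by rfl) (by simp) (by simp)
      · simp only [hsemi, if_false, Bool.false_eq_true]
        exact ih p.2 p.1 p.1 [p.2] col hmem'
          (by simp [PySem.Chars.join_singleton]) (by simpa using hpstr) (fun _ => rfl)
    | cons g0 gr =>
      subst hg
      have hbne : buf ≠ "" := by
        intro h
        have : buf.toList = [] := by simp [h]
        rw [hbuf] at this
        exact crc_join_ne_nil _ _ (by simp)
          (by
            intro x hx
            simp only [List.mem_map] at hx
            obtain ⟨g, hgmem, rfl⟩ := hx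
            exact fun hnil => (hgrp g hgmem).1 hnil) this
      have hstAB : stA = stB := hst (by simp)
      subst hstAB
      rw [crc_core, crc_merge_step]
      simp only [if_neg hbne, if_neg (by simp : ¬(g0 :: gr = []))]
      have hjoin : (buf ++ "  " ++ p.2).toList =
          PySem.Chars.join "  ".toList (((g0 :: gr) ++ [p.2]).map String.toList) := by
        have hmap : ((g0 :: gr) ++ [p.2]).map String.toList =
            ((g0 :: gr).map String.toList) ++ [p.2.toList] := by simp
        rw [hmap, crc_join_append_singleton _ _ _ (by simp),
          String.toList_append, String.toList_append, hbuf]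
      by_cases hsemi : PySem.Str.isIn ";" p.2 = true
      · simp only [hsemi, if_true]
        have hjs : CrcStripped (buf ++ "  " ++ p.2).toList := by
          rw [hjoin]
          apply crc_join_stripped _ _ (by simp)
          intro x hx
          rw [List.mem_map] at hx
          obtain ⟨g, hgmem, rfl⟩ := hx
          simp only [List.cons_append, List.mem_cons, List.mem_append, List.not_mem_nil,
            or_false] at hgmem
          rcases hgmem with rfl | hgmem | rfl
          · exact hgrp g (by simp)
          · exact hgrp g (by simp [hgmem])
          · exact hpstr
        have hemit : PySem.Str.strip (buf ++ "  " ++ p.2) =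
            PySem.Str.join "  " ((g0 :: gr) ++ [p.2]) := by
          apply String.toList_inj.mp
          rw [PySem.Str.toList_strip, crc_stripped_strip_eq hjs, PySem.Str.toList_join, hjoin]
        simp only [hemit]
        exact ih "" 0 stA [] _ hmem' (by rfl) (by simp) (by simp)
      · simp only [hsemi, Bool.false_eq_true, if_false]
        refine ih (buf ++ "  " ++ p.2) stA stA ((g0 :: gr) ++ [p.2]) col hmem' hjoin ?_
          (fun _ => rfl)
        intro x hx
        simp only [List.cons_append, List.mem_cons, List.mem_append, List.not_mem_nil,
          or_false] at hx
        rcases hx with rfl | hx | rfl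
        · exact hgrp x (by simp)
        · exact hgrp x (by simp [hx])
        · exact hpstr

theorem crc_build_eq (l : List (Int × String)) :
    ∀ (acc : List (Int × String)),
      l.foldl (fun acc p =>
        match crc_clean_line p.1 p.2 with
        | some item => acc ++ [item]
        | none => acc) acc =
      acc ++ l.filterMap (fun p => crc_clean_line p.1 p.2) := by
  induction l with
  | nil => intro acc; simp
  | cons p l ih =>
    intro acc
    simp only [List.foldl_cons, List.filterMap_cons]
    cases h : crc_clean_line p.1 p.2 with
    | none => simp [ih]
    | some q => simp [ih]

theorem crc_cleaned_prop (l : List (Int × String)) :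
    ∀ p ∈ l.filterMap (fun q => crc_clean_line q.1 q.2),
      ∃ s : String, p.2 = PySem.Str.strip s ∧ p.2 ≠ "" := by
  intro p hp
  rw [List.mem_filterMap] at hp
  obtain ⟨q, -, hq⟩ := hp
  simp only [crc_clean_line] at hq
  split_ifs at hq with h1 h2
  · obtain rfl :
        (q.1, PySem.Str.strip (((PySem.Str.split? (PySem.Str.upper q.2) "!").getD []).headD ""))
          = p := Option.some.inj hq
    exact ⟨_, rfl, h2⟩

theorem crc_foldl_filterMap (l : List (Int × String)) :
    ∀ (st : String × Int × List (Int × String)),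
      l.foldl (fun st p =>
        match crc_clean_line p.1 p.2 with
        | some q => crc_core st q
        | none => st) st =
      (l.filterMap (fun p => crc_clean_line p.1 p.2)).foldl crc_core st := by
  induction l with
  | nil => intro st; rfl
  | cons p l ih =>
    intro st
    simp only [List.foldl_cons, List.filterMap_cons]
    cases h : crc_clean_line p.1 p.2 <;> simp [ih]

-- ===== VERDICT (by name: the statement is the Claim_ definition above) =====
theorem collect_raw_commands_spec : Claim_equal_collect_raw_commands := by
  intro input_lines _
  unfold Spec_collect_raw_commands collect_raw_commands collect_raw_commands_alt
  rw [crc_build_eq]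
  have hstep : collect_raw_commands_step = (fun st p =>
      match crc_clean_line p.1 p.2 with
      | some q => crc_core st q
      | none => st) :=
    funext fun st => funext fun p => crc_stepA_eq st p
  rw [hstep, crc_foldl_filterMap, List.nil_append]
  exact crc_merge_eq _ "" 0 0 [] [] (crc_cleaned_prop _) rfl (by simp) (by simp)
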